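-- pv_equiv track=rewrite | github.com/alecboyadjievboyd/MathematicalModelling | parsing_algebra.py | check_implicit
-- ===== SOURCE A (Python) =====
-- def check_implicit(input):
--
--     i = 0
--     ans = True
--     while (i < len(input)):
--
--         if (input[i] >= '0' and input[i] <= '9'):
--             ans = True
--             i += 1
--
--         elif(input[i] =='/' or input[i] == '-'):
--             i += 1
--             ans = False
--
--         elif ((input[i] == 'x' or input[i] == '(') and ans):
--             return i, True
--         else:
--             return i, False
--
--     return i, False
-- ===== SOURCE B (Python) =====
-- def check_implicit(input):
--     # No index scan: strip the leading run of digits/'/'/'-' with lstrip,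
--     # then decide once from the stripped remainder and the stripped-off prefix.
--     rest = input.lstrip("0123456789/-")
--     head = input[:len(input) - len(rest)]
--     # implicit multiplication iff the remainder starts with 'x' or '(' and the
--     # stripped prefix does not end with '/' or '-' (its chars are all digits/'/'/'-',
--     # so an empty prefix or one ending in a digit means the last processed char, if
--     # any, was a digit).
--     if rest[:1] in ("x", "(") and not head.endswith(("/", "-")):
--         return len(head), True
--     return len(head), False
-- ===== Notes on version B (the rewrite author's own statement) =====
-- stated objective: simpler
-- what changed: Replaces A's index loop that threads a boolean 'ans' flag and returns from inside it with a loop-free string-method form: lstrip the digit/'/'/'-' prefix, then decide once from the remainder's first character and whether the stripped prefix ends with '/' or '-'.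
import Mathlib
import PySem

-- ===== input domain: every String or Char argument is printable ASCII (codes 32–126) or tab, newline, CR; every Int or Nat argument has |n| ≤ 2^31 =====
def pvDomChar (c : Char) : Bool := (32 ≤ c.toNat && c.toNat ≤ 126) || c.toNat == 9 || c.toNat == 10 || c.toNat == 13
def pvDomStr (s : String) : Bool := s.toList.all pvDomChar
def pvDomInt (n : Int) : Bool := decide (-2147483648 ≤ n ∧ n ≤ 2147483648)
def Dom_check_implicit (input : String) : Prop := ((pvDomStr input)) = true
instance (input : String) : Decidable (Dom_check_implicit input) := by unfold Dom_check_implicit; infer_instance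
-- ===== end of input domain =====

-- B replaces A's index loop threading an 'ans' flag by a loop-free string-method form:
-- lstrip the digit/'/'/'-' prefix, then decide once from the remainder's first char and
-- whether the stripped prefix ends with '/' or '-'; objective: simpler.

-- ===== PORT A =====
-- A's while loop: state (i, ans), scanning the suffix of the input starting at index i.
def checkGoA : List Char → Int → Bool → Int × Bool
  | [], i, _ => (i, false)
  | c :: cs, i, ans =>
    if '0' ≤ c ∧ c ≤ '9' then checkGoA cs (i + 1) true
    else if c = '/' ∨ c = '-' then checkGoA cs (i + 1) false
    else if (c = 'x' ∨ c = '(') ∧ ans = true then (i, true)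
    else (i, false)

def check_implicit (input : String) : Int × Bool :=
  checkGoA input.toList 0 true

-- ===== PORT B =====
-- membership in the strip set "0123456789/-" of Source B, written as the range test on digits
-- plus the two explicit chars (exact: same characters)
def contB (c : Char) : Bool := ('0' ≤ c && c ≤ '9') || c == '/' || c == '-'

def check_implicit_alt (input : String) : Int × Bool :=
  let cs := input.toList
  -- rest = input.lstrip("0123456789/-")  (exact: lstrip with a char set drops the
  -- longest prefix of chars in the set = dropWhile membership)
  let rest := cs.dropWhile contB
  -- head = input[:len(input) - len(rest)]
  let head := cs.take (cs.length - rest.length)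
  -- rest[:1] in ("x", "(")  — a one-char slice equal to "x" or "("
  let startsXP := match rest with
    | [] => false
    | c :: _ => c == 'x' || c == '('
  -- head.endswith(("/", "-"))
  let endsSlash := match head.getLast? with
    | some p => p == '/' || p == '-'
    | none => false
  if startsXP && !endsSlash then ((head.length : Int), true)
  else ((head.length : Int), false)

-- ===== PRECONDITION & SPEC =====
def Spec_check_implicit (input : String) (out : Int × Bool) : Prop := out = check_implicit_alt input
instance (input : String) (out : Int × Bool) : Decidable (Spec_check_implicit input out) := by unfold Spec_check_implicit; infer_instance

-- ===== CLAIM (what is proved, stated in full; the proofs are below) =====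
def Claim_equal_check_implicit : Prop := ∀ (input : String), Dom_check_implicit input → Spec_check_implicit input (check_implicit input)

-- ===== LEMMAS AND PROOFS =====

def digitB (c : Char) : Bool := '0' ≤ c && c ≤ '9'

-- proof-side reference: offset of A's stop position within the suffix, and the flag,
-- threading ans exactly as A does
def specFn : List Char → Bool → Nat × Bool
  | [], _ => (0, false)
  | c :: cs, ans =>
    if contB c then
      let r := specFn cs (digitB c)
      (r.1 + 1, r.2)
    else (0, ((c == 'x' || c == '(') && ans))

theorem goA_eq_spec (cs : List Char) (i : Int) (ans : Bool) :
    checkGoA cs i ans = (i + ((specFn cs ans).1 : Int), (specFn cs ans).2) := by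
  induction cs generalizing i ans with
  | nil => simp [checkGoA, specFn]
  | cons c cs ih =>
    by_cases hd : '0' ≤ c ∧ c ≤ '9'
    · have hc : contB c = true := by
        simp only [contB, Bool.or_eq_true, Bool.and_eq_true, decide_eq_true_eq]
        exact Or.inl (Or.inl ⟨hd.1, hd.2⟩)
      have hdig : digitB c = true := by
        simp only [digitB, Bool.and_eq_true, decide_eq_true_eq]; exact hd
      rw [show checkGoA (c :: cs) i ans = checkGoA cs (i + 1) true from by
            simp [checkGoA, hd]]
      rw [ih, show specFn (c :: cs) ans = ((specFn cs (digitB c)).1 + 1, (specFn cs (digitB c)).2) from by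
            simp [specFn, hc]]
      rw [hdig]
      simp only [Prod.mk.injEq]
      refine ⟨by push_cast; ring, trivial⟩
    · by_cases hsl : c = '/' ∨ c = '-'
      · have hc : contB c = true := by
          rcases hsl with h | h <;> simp [contB, h]
        have hdig : digitB c = false := by
          rcases hsl with h | h <;> subst h <;> decide
        rw [show checkGoA (c :: cs) i ans = checkGoA cs (i + 1) false from by
              simp [checkGoA, hd, hsl]]
        rw [ih, show specFn (c :: cs) ans = ((specFn cs (digitB c)).1 + 1, (specFn cs (digitB c)).2) from by
              simp [specFn, hc]]
        rw [hdig]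
        simp only [Prod.mk.injEq]
        refine ⟨by push_cast; ring, trivial⟩
      · have hc : contB c = false := by
          simp only [contB, Bool.or_eq_false_iff, Bool.and_eq_false_iff]
          refine ⟨⟨?_, ?_⟩, ?_⟩
          · rcases Decidable.em ('0' ≤ c) with h | h
            · right; simp only [decide_eq_false_iff_not]
              intro h9; exact hd ⟨h, h9⟩
            · left; simp only [decide_eq_false_iff_not]; exact h
          · simp only [beq_eq_false_iff_ne, ne_eq]
            intro h; exact hsl (Or.inl h)
          · simp only [beq_eq_false_iff_ne, ne_eq]
            intro h; exact hsl (Or.inr h)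
        rw [show specFn (c :: cs) ans = (0, ((c == 'x' || c == '(') && ans)) from by
              simp [specFn, hc]]
        by_cases hx : (c = 'x' ∨ c = '(') ∧ ans = true
        · rw [show checkGoA (c :: cs) i ans = (i, true) from by
                simp [checkGoA, hd, hsl, hx]]
          obtain ⟨h1, h2⟩ := hx
          rcases h1 with h | h <;> simp [h, h2]
        · rw [show checkGoA (c :: cs) i ans = (i, false) from by
                simp only [checkGoA]; rw [if_neg hd, if_neg hsl, if_neg hx]]
          simp only [Prod.mk.injEq, add_zero, Nat.cast_zero, true_and]
          rcases Decidable.em (c = 'x' ∨ c = '(') with h | h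
          · have : ans = false := by
              cases ans
              · rfl
              · exact absurd ⟨h, rfl⟩ hx
            simp [this]
          · push_neg at h
            simp [h.1, h.2]

theorem specFn_fst (cs : List Char) (ans : Bool) :
    (specFn cs ans).1 = (cs.takeWhile contB).length := by
  induction cs generalizing ans with
  | nil => simp [specFn]
  | cons c cs ih =>
    by_cases hc : contB c = true
    · simp [specFn, hc, List.takeWhile_cons, ih]
    · simp only [Bool.not_eq_true] at hc
      simp [specFn, hc, List.takeWhile_cons]

theorem specFn_snd (cs : List Char) (ans : Bool) :
    (specFn cs ans).2 =
      ((match cs.dropWhile contB with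
        | [] => false
        | c :: _ => (c == 'x' || c == '(')) &&
       (match (cs.takeWhile contB).getLast? with
        | none => ans
        | some p => digitB p)) := by
  induction cs generalizing ans with
  | nil => simp [specFn]
  | cons c cs ih =>
    by_cases hc : contB c = true
    · rw [show (specFn (c :: cs) ans).2 = (specFn cs (digitB c)).2 from by simp [specFn, hc]]
      rw [ih]
      rw [show (c :: cs).dropWhile contB = cs.dropWhile contB from by simp [List.dropWhile_cons, hc]]
      rw [show (c :: cs).takeWhile contB = c :: cs.takeWhile contB from by simp [List.takeWhile_cons, hc]]
      rcases h : (cs.takeWhile contB).getLast? with _ | p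
      · simp [List.getLast?_cons, h]
      · simp [List.getLast?_cons, h]
    · simp only [Bool.not_eq_true] at hc
      simp [specFn, hc, List.dropWhile_cons, List.takeWhile_cons]

-- a char of the stripped prefix is a digit iff it is not '/' or '-'
theorem digit_iff_not_slash (p : Char) (hp : contB p = true) :
    digitB p = !(p == '/' || p == '-') := by
  by_cases h : p = '/' ∨ p = '-'
  · rcases h with h | h <;> subst h <;> decide
  · have h1 : ¬ p = '/' := fun hh => h (Or.inl hh)
    have h2 : ¬ p = '-' := fun hh => h (Or.inr hh)
    have hd : digitB p = true := by
      simp only [contB, Bool.or_eq_true, beq_iff_eq] at hp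
      rcases hp with (hp | hp) | hp
      · exact hp
      · exact absurd hp h1
      · exact absurd hp h2
    rw [hd]; simp [h1, h2]

theorem main_eq (cs : List Char) : checkGoA cs 0 true =
    (let rest := cs.dropWhile contB
     let head := cs.take (cs.length - rest.length)
     let startsXP := match rest with
       | [] => false
       | c :: _ => c == 'x' || c == '('
     let endsSlash := match head.getLast? with
       | some p => p == '/' || p == '-'
       | none => false
     if startsXP && !endsSlash then ((head.length : Int), true)
     else ((head.length : Int), false)) := by
  rw [goA_eq_spec, specFn_fst, specFn_snd]
  have hlen : cs.length - (cs.dropWhile contB).length = (cs.takeWhile contB).length := by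
    have := congrArg List.length (List.takeWhile_append_dropWhile (p := contB) (l := cs))
    simp only [List.length_append] at this
    omega
  have htake : cs.take (cs.takeWhile contB).length = cs.takeWhile contB :=
    (List.prefix_iff_eq_take.mp (List.takeWhile_prefix contB)).symm
  simp only [hlen, htake, zero_add]
  rcases hdw : cs.dropWhile contB with _ | ⟨c, rest⟩
  · simp
  · rcases hlast : (cs.takeWhile contB).getLast? with _ | p
    · cases hb : (c == 'x' || c == '(') <;> simp [hb]
    · have hpc : contB p = true := List.mem_takeWhile_imp (List.mem_of_getLast? hlast)
      have hdig := digit_iff_not_slash p hpc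
      cases hxb : (c == 'x' || c == '(') <;> cases hsb : (p == '/' || p == '-') <;>
        simp [hxb, hsb, hdig]

-- ===== VERDICT (by name: the statement is the Claim_ definition above) =====
theorem check_implicit_spec : Claim_equal_check_implicit := by
  intro input _
  unfold Spec_check_implicit check_implicit check_implicit_alt
  exact main_eq input.toList
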